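-- pv_equiv track=rewrite | github.com/zynskibud/GLEIF_Pipeline | Tests/Test_Relationships.py | get_ultimate_direct_keys
-- ===== SOURCE A (Python) =====
-- def get_ultimate_direct_keys(dict_level_2_data):
--     list_direct_keys = []
--     list_ultimate_keys = []
--
--     for key, value in dict_level_2_data.items():
--         if any(item[2] == "IS_DIRECTLY_CONSOLIDATED_BY" for item in value):
--             list_direct_keys.append(key)
--         if any(item[2] == "IS_ULTIMATELY_CONSOLIDATED_BY" for item in value):
--             list_ultimate_keys.append(key)
--
--     return list_direct_keys , list_ultimate_keys
-- ===== SOURCE B (Python) =====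
-- def get_ultimate_direct_keys(dict_level_2_data):
--     list_direct_keys = []
--     list_ultimate_keys = []
--
--     for key, value in dict_level_2_data.items():
--         found_direct = False
--         found_ultimate = False
--         for item in value:
--             rel = item[2]
--             if rel == "IS_DIRECTLY_CONSOLIDATED_BY":
--                 found_direct = True
--             elif rel == "IS_ULTIMATELY_CONSOLIDATED_BY":
--                 found_ultimate = True
--             if found_direct and found_ultimate:
--                 break
--         if found_direct:
--             list_direct_keys.append(key)
--         if found_ultimate:
--             list_ultimate_keys.append(key)
--
--     return list_direct_keys, list_ultimate_keys
-- ===== Notes on version B (the rewrite author's own statement) =====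
-- stated objective: alternative
-- what changed: A runs two separate any() scans over each value list; B scans each value list once, maintaining found_direct/found_ultimate flags and breaking early once both relationship types are seen.
import Mathlib
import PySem

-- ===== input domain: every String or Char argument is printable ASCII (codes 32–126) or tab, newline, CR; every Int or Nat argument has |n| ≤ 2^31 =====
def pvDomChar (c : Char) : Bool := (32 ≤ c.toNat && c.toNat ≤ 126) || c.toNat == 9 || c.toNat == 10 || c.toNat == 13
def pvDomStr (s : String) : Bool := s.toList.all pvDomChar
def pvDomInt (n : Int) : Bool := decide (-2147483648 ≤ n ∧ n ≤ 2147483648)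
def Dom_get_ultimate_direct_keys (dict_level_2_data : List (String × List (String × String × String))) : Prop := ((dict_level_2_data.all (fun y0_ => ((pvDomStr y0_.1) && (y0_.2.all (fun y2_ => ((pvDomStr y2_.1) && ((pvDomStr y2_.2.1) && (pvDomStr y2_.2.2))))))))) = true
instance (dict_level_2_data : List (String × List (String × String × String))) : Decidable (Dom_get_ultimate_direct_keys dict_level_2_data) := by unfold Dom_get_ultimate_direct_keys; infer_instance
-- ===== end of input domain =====

-- ===== PORT A =====
def get_ultimate_direct_keys (dict_level_2_data : List (String × List (String × String × String))) : List String × List String :=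
  dict_level_2_data.foldl (fun acc kv =>
    let acc1 := if kv.2.any (fun item => item.2.2 == "IS_DIRECTLY_CONSOLIDATED_BY") then acc.1 ++ [kv.1] else acc.1
    let acc2 := if kv.2.any (fun item => item.2.2 == "IS_ULTIMATELY_CONSOLIDATED_BY") then acc.2 ++ [kv.1] else acc.2
    (acc1, acc2)) ([], [])

-- ===== PORT B =====
-- one pass over each value list with two flags and an early break (B's inner loop)
def pvScanFlags : List (String × String × String) → Bool → Bool → Bool × Bool
  | [], fd, fu => (fd, fu)
  | item :: rest, fd, fu =>
    let rel := item.2.2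
    let fd' := if rel == "IS_DIRECTLY_CONSOLIDATED_BY" then true else fd
    let fu' := if !(rel == "IS_DIRECTLY_CONSOLIDATED_BY") && rel == "IS_ULTIMATELY_CONSOLIDATED_BY" then true else fu
    if fd' && fu' then (fd', fu') else pvScanFlags rest fd' fu'

def get_ultimate_direct_keys_alt (dict_level_2_data : List (String × List (String × String × String))) : List String × List String :=
  dict_level_2_data.foldl (fun acc kv =>
    let flags := pvScanFlags kv.2 false false
    let acc1 := if flags.1 then acc.1 ++ [kv.1] else acc.1
    let acc2 := if flags.2 then acc.2 ++ [kv.1] else acc.2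
    (acc1, acc2)) ([], [])

-- ===== PRECONDITION & SPEC =====
def Spec_get_ultimate_direct_keys (dict_level_2_data : List (String × List (String × String × String))) (out : List String × List String) : Prop := out = get_ultimate_direct_keys_alt dict_level_2_data
instance (dict_level_2_data : List (String × List (String × String × String))) (out : List String × List String) : Decidable (Spec_get_ultimate_direct_keys dict_level_2_data out) := by unfold Spec_get_ultimate_direct_keys; infer_instance

-- ===== CLAIM (what is proved, stated in full; the proofs are below) =====
def Claim_equal_get_ultimate_direct_keys : Prop := ∀ (dict_level_2_data : List (String × List (String × String × String))), Dom_get_ultimate_direct_keys dict_level_2_data → Spec_get_ultimate_direct_keys dict_level_2_data (get_ultimate_direct_keys dict_level_2_data)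

-- ===== LEMMAS AND PROOFS =====

-- ===== VERDICT (by name: the statement is the Claim_ definition above) =====
lemma pvScanFlags_eq (l : List (String × String × String)) (fd fu : Bool) :
    pvScanFlags l fd fu =
      (fd || l.any (fun item => item.2.2 == "IS_DIRECTLY_CONSOLIDATED_BY"),
       fu || l.any (fun item => item.2.2 == "IS_ULTIMATELY_CONSOLIDATED_BY")) := by
  induction l generalizing fd fu with
  | nil => simp [pvScanFlags]
  | cons item rest ih =>
    simp only [pvScanFlags, List.any_cons]
    have e1 : (if item.2.2 == "IS_DIRECTLY_CONSOLIDATED_BY" then true else fd)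
        = (fd || (item.2.2 == "IS_DIRECTLY_CONSOLIDATED_BY")) := by
      by_cases hd : item.2.2 == "IS_DIRECTLY_CONSOLIDATED_BY" <;> simp [hd]
    have e2 : (if !(item.2.2 == "IS_DIRECTLY_CONSOLIDATED_BY") && (item.2.2 == "IS_ULTIMATELY_CONSOLIDATED_BY") then true else fu)
        = (fu || (item.2.2 == "IS_ULTIMATELY_CONSOLIDATED_BY")) := by
      by_cases hd : item.2.2 == "IS_DIRECTLY_CONSOLIDATED_BY"
      · have hu : (item.2.2 == "IS_ULTIMATELY_CONSOLIDATED_BY") = false := by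
          have := eq_of_beq hd; simp [this]
        simp [hd, hu]
      · by_cases hu : item.2.2 == "IS_ULTIMATELY_CONSOLIDATED_BY" <;> simp [hd, hu]
    rw [e1, e2]
    split
    · next hb =>
      simp only [Bool.and_eq_true] at hb
      simp [hb.1, hb.2, ← Bool.or_assoc]
    · rw [ih]
      simp [Bool.or_assoc]

theorem get_ultimate_direct_keys_spec : Claim_equal_get_ultimate_direct_keys := by
  intro d _
  unfold Spec_get_ultimate_direct_keys get_ultimate_direct_keys get_ultimate_direct_keys_alt
  have hf : (fun (acc : List String × List String) (kv : String × List (String × String × String)) =>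
      let acc1 := if kv.2.any (fun item => item.2.2 == "IS_DIRECTLY_CONSOLIDATED_BY") then acc.1 ++ [kv.1] else acc.1
      let acc2 := if kv.2.any (fun item => item.2.2 == "IS_ULTIMATELY_CONSOLIDATED_BY") then acc.2 ++ [kv.1] else acc.2
      (acc1, acc2))
    = (fun (acc : List String × List String) (kv : String × List (String × String × String)) =>
      let flags := pvScanFlags kv.2 false false
      let acc1 := if flags.1 then acc.1 ++ [kv.1] else acc.1
      let acc2 := if flags.2 then acc.2 ++ [kv.1] else acc.2
      (acc1, acc2)) := by
    funext acc kv
    simp only [pvScanFlags_eq, Bool.false_or]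
  rw [hf]
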